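/- GENERATED by farm/mkstatement.py from design/units.split.tsv — do not edit.
   THE SPLIT of the proof unit `codebook_decode_deinterleave_repeat.2` into `codebook_decode_deinterleave_repeat.2a`, `codebook_decode_deinterleave_repeat.2b`, `codebook_decode_deinterleave_repeat.2c`, `codebook_decode_deinterleave_repeat.2d`: the children's statements give the parent's
   UNCHANGED statement (so nothing above the parent — callers, compositions — is touched by the split). -/
import Vorbis.Spec.Codebook.Deint2
import Vorbis.Spec.Units.codebook_decode_deinterleave_repeat_2
import Vorbis.Spec.Units.codebook_decode_deinterleave_repeat_2a
import Vorbis.Spec.Units.codebook_decode_deinterleave_repeat_2b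
import Vorbis.Spec.Units.codebook_decode_deinterleave_repeat_2c
import Vorbis.Spec.Units.codebook_decode_deinterleave_repeat_2d
namespace Vorbis.Spec.Splits
open X86 X86.User Asan

/-- The children of the split unit `codebook_decode_deinterleave_repeat.2` prove it, by `Vorbis.Spec.Deint.Claim2.of_parts`. -/
theorem codebook_decode_deinterleave_repeat_2
    (h_codebook_decode_deinterleave_repeat_2a : Vorbis.Spec.codebook_decode_deinterleave_repeat_2a.Statement)
    (h_codebook_decode_deinterleave_repeat_2b : Vorbis.Spec.codebook_decode_deinterleave_repeat_2b.Statement)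
    (h_codebook_decode_deinterleave_repeat_2c : Vorbis.Spec.codebook_decode_deinterleave_repeat_2c.Statement)
    (h_codebook_decode_deinterleave_repeat_2d : Vorbis.Spec.codebook_decode_deinterleave_repeat_2d.Statement) :
    Vorbis.Spec.codebook_decode_deinterleave_repeat_2.Statement := by
  intro Lay _hLay μ _hμ u₀ _hcode _h_prep_huffman _h_asan_load1_noabort _h_asan_load4_noabort _h_error _h_codebook_decode_scalar_raw _h_asan_load2_noabort _h_asan_load8_noabort
  apply Vorbis.Spec.Deint.Claim2.of_parts
  · exact h_codebook_decode_deinterleave_repeat_2a Lay _hLay μ _hμ u₀ _hcode _h_prep_huffman _h_asan_load4_noabort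
  · exact h_codebook_decode_deinterleave_repeat_2b Lay _hLay μ _hμ u₀ _hcode _h_asan_load1_noabort _h_asan_load4_noabort _h_codebook_decode_scalar_raw _h_asan_load2_noabort _h_asan_load8_noabort
  · exact h_codebook_decode_deinterleave_repeat_2c Lay _hLay μ _hμ u₀ _hcode _h_asan_load1_noabort _h_asan_load4_noabort _h_error
  · exact h_codebook_decode_deinterleave_repeat_2d Lay _hLay μ _hμ u₀ _hcode _h_asan_load1_noabort _h_asan_load4_noabort

end Vorbis.Spec.Splits
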